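-- pv_equiv track=rewrite | github.com/hikodz/Python-Functions-Files-Regex | Functions/Function Kwargs.py | sum_special
-- ===== SOURCE A (Python) =====
-- def sum_special(numbers, only_even=False, only_odd=False, olny_positive=False, only_negative=False):
--     total = 0
--     for num in numbers:
--         if only_even :
--             if num %2==0:
--                 total+=num
--         elif only_odd:
--             if num % 2!=0:
--                 total+=num
--         elif olny_positive:
--             if num > 0 :
--                 total+=num
--         elif only_negative:
--             if num <0:
--                 total+=num
--         else:
--             total+=num
--     return total
-- ===== SOURCE B (Python) =====
-- def sum_special(numbers, only_even=False, only_odd=False, olny_positive=False, only_negative=False):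
--     # One flag-independent pass collecting aggregate sums, then arithmetic selection.
--     total = even_s = pos_s = neg_s = 0
--     for n in numbers:
--         total += n
--         if n % 2 == 0:
--             even_s += n
--         if n > 0:
--             pos_s += n
--         elif n < 0:
--             neg_s += n
--     if only_even:
--         return even_s
--     if only_odd:
--         return total - even_s
--     if olny_positive:
--         return pos_s
--     if only_negative:
--         return neg_s
--     return total
-- ===== Notes on version B (the rewrite author's own statement) =====
-- stated objective: alternative
-- what changed: Instead of filtering by the flag-chosen predicate inside the loop, B makes one flag-independent pass accumulating four aggregates (total, even, positive, negative sums) and then answers by selection/arithmetic, deriving the odd sum as total minus even sum.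
import Mathlib
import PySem

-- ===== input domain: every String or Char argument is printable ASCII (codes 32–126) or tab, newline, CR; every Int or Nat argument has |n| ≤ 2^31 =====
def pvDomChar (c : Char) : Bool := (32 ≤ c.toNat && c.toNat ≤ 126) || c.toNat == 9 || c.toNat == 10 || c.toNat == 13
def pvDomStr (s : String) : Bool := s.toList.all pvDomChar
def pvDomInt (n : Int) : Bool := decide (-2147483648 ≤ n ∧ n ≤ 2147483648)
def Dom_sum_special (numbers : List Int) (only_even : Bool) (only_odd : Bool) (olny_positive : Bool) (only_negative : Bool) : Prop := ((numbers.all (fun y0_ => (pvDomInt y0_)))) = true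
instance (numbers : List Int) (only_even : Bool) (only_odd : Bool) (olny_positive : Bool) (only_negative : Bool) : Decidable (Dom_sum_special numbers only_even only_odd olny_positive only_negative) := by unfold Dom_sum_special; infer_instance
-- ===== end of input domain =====

-- B replaces the per-element flag-filtered accumulation by one flag-independent pass of four
-- aggregates followed by arithmetic selection (odd = total - even); same O(n), 'alternative'.

-- ===== PORT A =====
-- A: single loop, elif flag dispatch per element
def sum_special (numbers : List Int) (only_even : Bool) (only_odd : Bool) (olny_positive : Bool) (only_negative : Bool) : Int :=
  numbers.foldl (fun total num =>
    if only_even then (if PySem.Int.mod num 2 = 0 then total + num else total)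
    else if only_odd then (if PySem.Int.mod num 2 ≠ 0 then total + num else total)
    else if olny_positive then (if num > 0 then total + num else total)
    else if only_negative then (if num < 0 then total + num else total)
    else total + num) 0

-- ===== PORT B =====
-- B: one flag-independent pass building (total, even_s, pos_s, neg_s), then select/derive
def pvStats (numbers : List Int) : Int × Int × Int × Int :=
  numbers.foldl (fun s n =>
    (s.1 + n,
     (if PySem.Int.mod n 2 = 0 then s.2.1 + n else s.2.1),
     (if n > 0 then s.2.2.1 + n else s.2.2.1),
     (if n > 0 then s.2.2.2 else if n < 0 then s.2.2.2 + n else s.2.2.2)))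
    (0, 0, 0, 0)

def sum_special_alt (numbers : List Int) (only_even : Bool) (only_odd : Bool) (olny_positive : Bool) (only_negative : Bool) : Int :=
  let s := pvStats numbers
  if only_even then s.2.1
  else if only_odd then s.1 - s.2.1
  else if olny_positive then s.2.2.1
  else if only_negative then s.2.2.2
  else s.1

-- ===== PRECONDITION & SPEC =====
def Spec_sum_special (numbers : List Int) (only_even : Bool) (only_odd : Bool) (olny_positive : Bool) (only_negative : Bool) (out : Int) : Prop := out = sum_special_alt numbers only_even only_odd olny_positive only_negative
instance (numbers : List Int) (only_even : Bool) (only_odd : Bool) (olny_positive : Bool) (only_negative : Bool) (out : Int) : Decidable (Spec_sum_special numbers only_even only_odd olny_positive only_negative out) := by unfold Spec_sum_special; infer_instance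

-- ===== CLAIM (what is proved, stated in full; the proofs are below) =====
def Claim_equal_sum_special : Prop := ∀ (numbers : List Int) (only_even : Bool) (only_odd : Bool) (olny_positive : Bool) (only_negative : Bool), Dom_sum_special numbers only_even only_odd olny_positive only_negative → Spec_sum_special numbers only_even only_odd olny_positive only_negative (sum_special numbers only_even only_odd olny_positive only_negative)

-- ===== LEMMAS AND PROOFS =====

-- characterize the four components of B's stats fold, from an arbitrary start state
lemma pvStats_fold (xs : List Int) (t e p ng : Int) :
    xs.foldl (fun s n =>
      (s.1 + n,
       (if PySem.Int.mod n 2 = 0 then s.2.1 + n else s.2.1),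
       (if n > 0 then s.2.2.1 + n else s.2.2.1),
       (if n > 0 then s.2.2.2 else if n < 0 then s.2.2.2 + n else s.2.2.2)))
      (t, e, p, ng)
    = (t + xs.sum,
       e + (xs.filter (fun n => PySem.Int.mod n 2 = 0)).sum,
       p + (xs.filter (fun n => n > 0)).sum,
       ng + (xs.filter (fun n => n < 0)).sum) := by
  induction xs generalizing t e p ng with
  | nil => simp
  | cons x xs ih =>
    simp only [List.foldl_cons, ih, List.sum_cons, List.filter_cons, decide_eq_true_eq]
    split_ifs with h1 h2 h3 <;>
      first
      | (exfalso; omega)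
      | simp only [List.sum_cons, Prod.mk.injEq, add_assoc, and_self, and_true, true_and]

-- sum over odd elements = total sum - sum over even elements
lemma pv_odd_split (xs : List Int) :
    (xs.filter (fun n => PySem.Int.mod n 2 ≠ 0)).sum
      = xs.sum - (xs.filter (fun n => PySem.Int.mod n 2 = 0)).sum := by
  induction xs with
  | nil => simp
  | cons x xs ih =>
    simp only [List.filter_cons, List.sum_cons, decide_eq_true_eq]
    by_cases h : PySem.Int.mod x 2 = 0
    · rw [if_neg (fun hc => hc h), if_pos h, List.sum_cons, ih]; ring
    · rw [if_pos h, if_neg h, List.sum_cons, ih]; ring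

-- A's fold equals the filtered sum for the flag-selected predicate
lemma pvA_fold (oe oo op on : Bool) (xs : List Int) (acc : Int) :
    xs.foldl (fun total num =>
      if oe then (if PySem.Int.mod num 2 = 0 then total + num else total)
      else if oo then (if PySem.Int.mod num 2 ≠ 0 then total + num else total)
      else if op then (if num > 0 then total + num else total)
      else if on then (if num < 0 then total + num else total)
      else total + num) acc
    = acc +
      (if oe then (xs.filter (fun n => PySem.Int.mod n 2 = 0)).sum
       else if oo then (xs.filter (fun n => PySem.Int.mod n 2 ≠ 0)).sum
       else if op then (xs.filter (fun n => n > 0)).sum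
       else if on then (xs.filter (fun n => n < 0)).sum
       else xs.sum) := by
  induction xs generalizing acc with
  | nil => simp
  | cons x xs ih =>
    simp only [List.foldl_cons, ih, List.filter_cons, List.sum_cons, decide_eq_true_eq]
    cases oe <;> cases oo <;> cases op <;> cases on <;>
      simp only [Bool.false_eq_true, if_true, if_false] <;>
      (try split_ifs) <;> (try simp only [List.sum_cons]) <;> ring

-- ===== VERDICT (by name: the statement is the Claim_ definition above) =====
theorem sum_special_spec : Claim_equal_sum_special := by
  intro numbers oe oo op on _
  unfold Spec_sum_special sum_special sum_special_alt pvStats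
  rw [pvA_fold, pvStats_fold]
  cases oe <;> cases oo <;> cases op <;> cases on <;>
    simp only [Bool.false_eq_true, if_true, if_false, zero_add] <;>
    try ring
  all_goals exact pv_odd_split numbers
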